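-- pv_equiv track=rewrite | github.com/geovanicelebrim/tcc | BuscadorSemantico/extrator/extrator_relacoes/dictionary.py | computer_pertinence
-- ===== SOURCE A (Python) =====
-- def computer_pertinence(text, dictionary):
-- 	pertinence = 0
-- 	for token in text.split(' '):
-- 		try:
-- 			pertinence += dictionary[token]
-- 			pass
-- 		except Exception:
-- 			pertinence = pertinence
-- 		pass
-- 	return pertinence
-- ===== SOURCE B (Python) =====
-- def computer_pertinence(text, dictionary):
--     tokens = text.split(' ')
--     return sum(value * tokens.count(token) for token, value in dictionary.items())
-- ===== Notes on version B (the rewrite author's own statement) =====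
-- stated objective: alternative
-- what changed: B inverts the traversal: instead of A's pass over every token occurrence with try/except lookups, B iterates once over the dictionary's entries and adds value * tokens.count(key) for each entry.
import Mathlib
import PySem

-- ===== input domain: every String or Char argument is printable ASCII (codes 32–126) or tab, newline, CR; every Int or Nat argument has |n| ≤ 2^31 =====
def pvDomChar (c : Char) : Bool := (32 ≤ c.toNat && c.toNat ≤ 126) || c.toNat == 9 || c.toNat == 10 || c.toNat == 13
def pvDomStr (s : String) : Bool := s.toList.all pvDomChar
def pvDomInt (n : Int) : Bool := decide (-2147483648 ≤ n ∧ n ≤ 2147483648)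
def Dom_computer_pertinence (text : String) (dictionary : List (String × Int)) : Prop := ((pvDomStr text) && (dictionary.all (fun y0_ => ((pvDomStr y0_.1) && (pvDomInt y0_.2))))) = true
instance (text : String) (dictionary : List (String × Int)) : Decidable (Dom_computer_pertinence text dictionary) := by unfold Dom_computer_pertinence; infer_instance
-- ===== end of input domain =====

-- B inverts the traversal: it iterates over the dictionary's entries and adds
-- value * tokens.count(key), instead of A's per-token-occurrence loop with try/except;
-- objective: alternative decomposition, same cost.


-- text.split(' ') (sep is the nonempty literal " ", so Python's split never raises)
def pvTokens (text : String) : List String :=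
  (PySem.Chars.splitOn text.toList " ".toList).map String.ofList

-- dictionary[token] of the Python dict, given as an association list (first match)
def pvDictLookup (dictionary : List (String × Int)) (k : String) : Option Int :=
  (dictionary.find? (fun p => p.1 == k)).map (·.2)

-- ===== PORT A =====
def computer_pertinence (text : String) (dictionary : List (String × Int)) : Int :=
  (pvTokens text).foldl
    (fun pertinence token =>
      match pvDictLookup dictionary token with
      | some v => pertinence + v      -- pertinence += dictionary[token]
      | none => pertinence)           -- except Exception: pertinence = pertinence
    0

-- ===== PORT B =====
def computer_pertinence_alt (text : String) (dictionary : List (String × Int)) : Int :=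
  let tokens := pvTokens text                 -- tokens = text.split(' ')
  -- sum(value * tokens.count(token) for token, value in dictionary.items())
  (dictionary.map (fun p => p.2 * (PySem.List.count tokens p.1 : Int))).sum

-- ===== PRECONDITION & SPEC =====
-- Pre_ excludes association lists with duplicate keys: they do not represent a Python
-- dict (whose keys are unique), and on such a raw list B's own algorithm raises.
def Pre_computer_pertinence (text : String) (dictionary : List (String × Int)) : Prop :=
  (dictionary.map Prod.fst).Nodup
instance (text : String) (dictionary : List (String × Int)) : Decidable (Pre_computer_pertinence text dictionary) := by unfold Pre_computer_pertinence; infer_instance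

def pvWitness_computer_pertinence : String × (List (String × Int)) :=
  ("a b a", [("a", 2), ("b", 3)])

def Spec_computer_pertinence (text : String) (dictionary : List (String × Int)) (out : Int) : Prop := out = computer_pertinence_alt text dictionary
instance (text : String) (dictionary : List (String × Int)) (out : Int) : Decidable (Spec_computer_pertinence text dictionary out) := by unfold Spec_computer_pertinence; infer_instance

-- ===== CLAIM (what is proved, stated in full; the proofs are below) =====
def Claim_equal_computer_pertinence : Prop := ∀ (text : String) (dictionary : List (String × Int)), Dom_computer_pertinence text dictionary → Pre_computer_pertinence text dictionary → Spec_computer_pertinence text dictionary (computer_pertinence text dictionary)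

-- ===== LEMMAS AND PROOFS =====

-- the per-token contribution A adds
def pvGain (dictionary : List (String × Int)) (t : String) : Int :=
  match pvDictLookup dictionary t with
  | some v => v
  | none => 0

lemma portA_eq_sum (text : String) (dictionary : List (String × Int)) :
    computer_pertinence text dictionary
      = ((pvTokens text).map (pvGain dictionary)).sum := by
  unfold computer_pertinence
  have h : (fun (acc : Int) (t : String) =>
      match pvDictLookup dictionary t with
      | some v => acc + v
      | none => acc) = (fun acc t => acc + pvGain dictionary t) := by
    funext acc t
    unfold pvGain
    cases pvDictLookup dictionary t with
    | some v => rfl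
    | none => simp
  rw [h, PySem.List.foldl_add]
  simp

-- over a duplicate-free association list, the first-match lookup gain is the sum
-- of the matching entries' values
lemma gain_eq_sum (d : List (String × Int)) (t : String)
    (hnd : (d.map Prod.fst).Nodup) :
    pvGain d t = (d.map (fun p => if p.1 = t then p.2 else 0)).sum := by
  induction d with
  | nil => simp [pvGain, pvDictLookup]
  | cons p tl ih =>
    simp only [List.map_cons, List.nodup_cons] at hnd
    by_cases h : p.1 = t
    · have htail : (tl.map (fun q => if q.1 = t then q.2 else 0)).sum = 0 := by
        apply List.sum_eq_zero
        intro x hx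
        simp only [List.mem_map] at hx
        obtain ⟨q, hq, rfl⟩ := hx
        have hne : q.1 ≠ t := by
          intro he
          apply hnd.1
          have : p.1 = q.1 := by rw [h, ← he]
          rw [this]
          exact List.mem_map_of_mem hq
        simp [hne]
      simp [pvGain, pvDictLookup, h, htail]
    · have hb : (p.1 == t) = false := by simp [h]
      simp only [List.map_cons, List.sum_cons, if_neg h, zero_add]
      rw [← ih hnd.2]
      simp [pvGain, pvDictLookup, hb]

lemma sum_ite_eq_count (l : List String) (k : String) (v : Int) :
    (l.map (fun t => if k = t then v else 0)).sum = v * (l.count k : Int) := by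
  induction l with
  | nil => simp
  | cons h tl ih =>
    by_cases hk : k = h
    · simp only [List.map_cons, List.sum_cons, if_pos hk, ih]
      rw [hk, List.count_cons_self]
      push_cast; ring
    · simp [hk, Ne.symm hk, ih]

lemma sum_comm_int {α β : Type} (l1 : List α) (l2 : List β) (f : α → β → Int) :
    (l1.map (fun a => (l2.map (f a)).sum)).sum
      = (l2.map (fun b => (l1.map (fun a => f a b)).sum)).sum := by
  induction l1 with
  | nil => simp
  | cons a tl ih =>
    simp only [List.map_cons, List.sum_cons, ih]
    rw [← List.sum_map_add]

-- ===== VERDICT (by name: the statement is the Claim_ definition above) =====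
theorem computer_pertinence_spec : Claim_equal_computer_pertinence := by
  intro text dictionary _ hpre
  unfold Spec_computer_pertinence computer_pertinence_alt
  rw [portA_eq_sum]
  have h1 : (pvTokens text).map (pvGain dictionary)
      = (pvTokens text).map (fun t => (dictionary.map (fun p => if p.1 = t then p.2 else 0)).sum) := by
    apply List.map_congr_left
    intro t _
    exact gain_eq_sum dictionary t hpre
  rw [h1, sum_comm_int (pvTokens text) dictionary (fun t p => if p.1 = t then p.2 else 0)]
  apply congrArg List.sum
  apply List.map_congr_left
  intro p _
  show ((pvTokens text).map (fun t => if p.1 = t then p.2 else 0)).sum = _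
  rw [sum_ite_eq_count]
  simp [PySem.List.count]
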